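-- pv_equiv track=rewrite | github.com/TedCassirer/advent-of-code | aoc_cas/aoc2022/day8.py | buildVisibilityMapsFromOutside
-- ===== SOURCE A (Python) =====
-- def buildVisibilityMapsFromOutside(heights):
--     M, N = len(heights), len(heights[0])
--
--     left = [[-1] * N for _ in range(M)]
--     for y in range(1, M - 1):
--         for x in range(1, N - 1):
--             left[y][x] = max(left[y][x - 1], heights[y][x - 1])
--
--     top = [[-1] * N for _ in range(M)]
--     for x in range(1, N - 1):
--         for y in range(1, M - 1):
--             top[y][x] = max(top[y - 1][x], heights[y - 1][x])
--
--     right = [[-1] * N for _ in range(M)]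
--     for y in range(1, M - 1):
--         for x in range(N - 2, 0, -1):
--             right[y][x] = max(right[y][x + 1], heights[y][x + 1])
--
--     bot = [[-1] * N for _ in range(M)]
--     for x in range(1, N - 1):
--         for y in range(M - 2, 0, -1):
--             bot[y][x] = max(bot[y + 1][x], heights[y + 1][x])
--
--     return left, top, right, bot
-- ===== SOURCE B (Python) =====
-- def buildVisibilityMapsFromOutside(heights):
--     M, N = len(heights), len(heights[0])
--
--     def interior(y, x):
--         return 0 < y < M - 1 and 0 < x < N - 1
--
--     left = [[max([-1] + heights[y][0:x]) if interior(y, x) else -1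
--              for x in range(N)] for y in range(M)]
--     top = [[max([-1] + [heights[k][x] for k in range(y)]) if interior(y, x) else -1
--             for x in range(N)] for y in range(M)]
--     right = [[max([-1] + heights[y][x + 1:N]) if interior(y, x) else -1
--               for x in range(N)] for y in range(M)]
--     bot = [[max([-1] + [heights[k][x] for k in range(y + 1, M)]) if interior(y, x) else -1
--             for x in range(N)] for y in range(M)]
--     return left, top, right, bot
-- ===== Notes on version B (the rewrite author's own statement) =====
-- stated objective: simpler
-- what changed: Replaced the four in-place running-max DP sweeps over mutable grids with four pure per-cell comprehensions, each cell taking the max of the row/column slice on its side (with a -1 floor), so no grid is mutated and no recurrence state is carried.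
-- outside the precondition, e.g. on buildVisibilityMapsFromOutside([]): A raises IndexError, B raises IndexError
import Mathlib
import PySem

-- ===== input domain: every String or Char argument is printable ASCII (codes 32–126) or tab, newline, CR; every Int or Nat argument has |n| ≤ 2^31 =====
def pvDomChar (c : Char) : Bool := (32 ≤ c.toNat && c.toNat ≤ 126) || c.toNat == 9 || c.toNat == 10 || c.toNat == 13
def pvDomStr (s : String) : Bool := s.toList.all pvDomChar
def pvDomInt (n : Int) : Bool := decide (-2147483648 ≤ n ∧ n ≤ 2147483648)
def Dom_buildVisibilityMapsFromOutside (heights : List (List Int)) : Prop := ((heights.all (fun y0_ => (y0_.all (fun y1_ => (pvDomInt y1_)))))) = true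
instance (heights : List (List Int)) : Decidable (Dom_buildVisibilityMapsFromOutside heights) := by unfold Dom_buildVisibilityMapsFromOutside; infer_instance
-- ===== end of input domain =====

-- B replaces A's four mutable running-max DP sweeps by pure per-cell maxima of row/column
-- slices (objective: simpler).  Proved: A = B on every input on which the Python A returns.

-- ===== PORT A =====
-- g[y][x] = v for in-range indices 0 ≤ y < len g, 0 ≤ x < len g[y] (the only way A uses it)
def pvSet2 (g : List (List Int)) (y x : Int) (v : Int) : List (List Int) :=
  g.set y.toNat ((g.getD y.toNat []).set x.toNat v)

-- g[y][x] read, exact for the in-range non-negative indices A uses (Pre_ guarantees them)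
def pvGet2 (g : List (List Int)) (y x : Int) : Int :=
  (g.getD y.toNat []).getD x.toNat 0

def buildVisibilityMapsFromOutside (heights : List (List Int)) : List (List Int) × List (List Int) × List (List Int) × List (List Int) :=
  let M : Int := heights.length
  let N : Int := (heights.getD 0 []).length
  -- [[-1] * N for _ in range(M)]
  let init : List (List Int) := (List.range heights.length).map (fun _ => List.replicate (heights.getD 0 []).length (-1))
  let left := (PySem.List.pyRange 1 (M - 1) 1).foldl (fun g y =>
    (PySem.List.pyRange 1 (N - 1) 1).foldl (fun g x =>
      pvSet2 g y x (max (pvGet2 g y (x - 1)) (pvGet2 heights y (x - 1)))) g) init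
  let top := (PySem.List.pyRange 1 (N - 1) 1).foldl (fun g x =>
    (PySem.List.pyRange 1 (M - 1) 1).foldl (fun g y =>
      pvSet2 g y x (max (pvGet2 g (y - 1) x) (pvGet2 heights (y - 1) x))) g) init
  let right := (PySem.List.pyRange 1 (M - 1) 1).foldl (fun g y =>
    (PySem.List.pyRange (N - 2) 0 (-1)).foldl (fun g x =>
      pvSet2 g y x (max (pvGet2 g y (x + 1)) (pvGet2 heights y (x + 1)))) g) init
  let bot := (PySem.List.pyRange 1 (N - 1) 1).foldl (fun g x =>
    (PySem.List.pyRange (M - 2) 0 (-1)).foldl (fun g y =>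
      pvSet2 g y x (max (pvGet2 g (y + 1) x) (pvGet2 heights (y + 1) x))) g) init
  (left, top, right, bot)

-- ===== PORT B =====
-- max([-1] + xs)
def pvFoldMax (xs : List Int) : Int := xs.foldl max (-1)

-- 0 < y < M - 1 and 0 < x < N - 1
def pvInterior (M N y x : Nat) : Bool :=
  decide (0 < y) && decide (y + 1 < M) && decide (0 < x) && decide (x + 1 < N)

def buildVisibilityMapsFromOutside_alt (heights : List (List Int)) : List (List Int) × List (List Int) × List (List Int) × List (List Int) :=
  let M : Nat := heights.length
  let N : Nat := (heights.getD 0 []).length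
  -- heights[y][0:x] with 0 ≤ x ≤ len row: take x
  let left := (List.range M).map (fun y => (List.range N).map (fun x =>
    if pvInterior M N y x then pvFoldMax ((heights.getD y []).take x) else -1))
  -- [heights[k][x] for k in range(y)]
  let top := (List.range M).map (fun y => (List.range N).map (fun x =>
    if pvInterior M N y x then pvFoldMax ((List.range y).map (fun k => (heights.getD k []).getD x 0)) else -1))
  -- heights[y][x+1:N] with x+1 ≤ N ≤ len row: drop (x+1) of take N
  let right := (List.range M).map (fun y => (List.range N).map (fun x =>
    if pvInterior M N y x then pvFoldMax (((heights.getD y []).take N).drop (x + 1)) else -1))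
  -- [heights[k][x] for k in range(y+1, M)]
  let bot := (List.range M).map (fun y => (List.range N).map (fun x =>
    if pvInterior M N y x then pvFoldMax (((List.range M).drop (y + 1)).map (fun k => (heights.getD k []).getD x 0)) else -1))
  (left, top, right, bot)

-- ===== PRECONDITION & SPEC =====
-- Pre_ is exactly where the Python A returns: A raises IndexError on [] (heights[0]) and, when
-- M ≥ 3 and N ≥ 3, on grids whose interior rows are shorter than N = len(heights[0]) or whose
-- last row is shorter than N - 1 (the indices the four sweeps actually read).
def Pre_buildVisibilityMapsFromOutside (heights : List (List Int)) : Prop :=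
  heights ≠ [] ∧
  (3 ≤ heights.length → 3 ≤ (heights.getD 0 []).length →
    (∀ i < heights.length, 1 ≤ i → i + 1 < heights.length →
      (heights.getD 0 []).length ≤ (heights.getD i []).length) ∧
    (heights.getD 0 []).length ≤ (heights.getD (heights.length - 1) []).length + 1)
instance (heights : List (List Int)) : Decidable (Pre_buildVisibilityMapsFromOutside heights) := by
  unfold Pre_buildVisibilityMapsFromOutside; infer_instance

def pvWitness_buildVisibilityMapsFromOutside : List (List Int) := [[1, 2, 3], [4, 5, 6], [7, 8, 9]]

def Spec_buildVisibilityMapsFromOutside (heights : List (List Int)) (out : List (List Int) × List (List Int) × List (List Int) × List (List Int)) : Prop := out = buildVisibilityMapsFromOutside_alt heights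
instance (heights : List (List Int)) (out : List (List Int) × List (List Int) × List (List Int) × List (List Int)) : Decidable (Spec_buildVisibilityMapsFromOutside heights out) := by unfold Spec_buildVisibilityMapsFromOutside; infer_instance

-- ===== CLAIM (what is proved, stated in full; the proofs are below) =====
def Claim_equal_buildVisibilityMapsFromOutside : Prop := ∀ (heights : List (List Int)), Dom_buildVisibilityMapsFromOutside heights → Pre_buildVisibilityMapsFromOutside heights → Spec_buildVisibilityMapsFromOutside heights (buildVisibilityMapsFromOutside heights)

-- ===== LEMMAS AND PROOFS =====

-- ---- generic list bookkeeping ----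
theorem pvGetD_set {α : Type} (l : List α) (n j : Nat) (v d : α) :
    (l.set n v).getD j d = if n = j ∧ n < l.length then v else l.getD j d := by
  simp [List.getD, List.getElem?_set]
  split_ifs <;> simp_all
  omega

theorem pvFoldMax_cons (c : Int) (t : List Int) :
    (c :: t).foldl max (-1) = max c (t.foldl max (-1)) := by
  have := List.foldl_assoc (op := (max : Int → Int → Int)) (l := t) (a₁ := c) (a₂ := (-1))
  simp only [List.foldl_cons]
  rw [max_comm (-1) c]
  exact this

theorem set_getD_self (g : List (List Int)) (n : Nat) : g.set n (g.getD n []) = g := by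
  by_cases h : n < g.length
  · rw [List.getD_eq_getElem _ _ h]
    exact List.set_getElem_self h
  · rw [List.set_eq_of_length_le (by omega)]

theorem getD_set_self (g : List (List Int)) (n : Nat) (x : Nat) (v : Int) :
    (g.set n ((g.getD n []).set x v)).getD n [] = (g.getD n []).set x v := by
  by_cases h : n < g.length
  · rw [List.getD_eq_getElem _ _ (by simpa using h)]
    simp [List.getElem_set_self (by simpa using h)]
  · rw [List.set_eq_of_length_le (by omega)]
    rw [List.getD_eq_default _ _ (by omega)]
    rfl

theorem foldl_id {β : Type} (L : List β) (g : List (List Int)) :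
    L.foldl (fun g _ => g) g = g := by
  induction L generalizing g with
  | nil => rfl
  | cons b t ih => exact ih g

-- ---- closed forms for the four directional maxima ----
def prefMax (r : List Int) (x : Nat) : Int := (r.take x).foldl max (-1)
def sufMax (r : List Int) (N x : Nat) : Int := ((r.take N).drop (x + 1)).foldl max (-1)
def colPref (h : List (List Int)) (x y : Nat) : Int :=
  ((List.range y).map (fun k => (h.getD k []).getD x 0)).foldl max (-1)
def colSuf (h : List (List Int)) (M x y : Nat) : Int :=
  (((List.range M).drop (y + 1)).map (fun k => (h.getD k []).getD x 0)).foldl max (-1)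

theorem prefMax_succ (r : List Int) (j : Nat) (hj : j < r.length) :
    prefMax r (j + 1) = max (prefMax r j) (r.getD j 0) := by
  unfold prefMax
  rw [List.take_add_one, List.getElem?_eq_getElem hj]
  simp only [Option.toList_some, List.foldl_append, List.foldl_cons, List.foldl_nil]
  rw [List.getD_eq_getElem r 0 hj]

theorem sufMax_succ (r : List Int) (N j : Nat) (hj : j + 1 < N) (hN : N ≤ r.length) :
    sufMax r N j = max (sufMax r N (j + 1)) (r.getD (j + 1) 0) := by
  unfold sufMax
  have hlt : j + 1 < (r.take N).length := by simp; omega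
  rw [List.drop_eq_getElem_cons hlt, pvFoldMax_cons, List.getElem_take, max_comm]
  congr 1
  exact (List.getD_eq_getElem r 0 (by omega)).symm

theorem sufMax_last (r : List Int) (N j : Nat) (hj : N ≤ j + 1) : sufMax r N j = -1 := by
  unfold sufMax
  rw [List.drop_of_length_le (by simp; omega)]
  rfl

theorem colPref_succ (h : List (List Int)) (x y : Nat) :
    colPref h x (y + 1) = max (colPref h x y) ((h.getD y []).getD x 0) := by
  unfold colPref
  rw [List.range_succ]
  simp [List.foldl_append]

theorem colSuf_succ (h : List (List Int)) (M x y : Nat) (hy : y + 1 < M) :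
    colSuf h M x y = max (colSuf h M x (y + 1)) ((h.getD (y + 1) []).getD x 0) := by
  unfold colSuf
  have hlt : y + 1 < (List.range M).length := by simpa using hy
  rw [List.drop_eq_getElem_cons hlt]
  simp only [List.map_cons, List.getElem_range, pvFoldMax_cons]
  rw [max_comm]

theorem colSuf_last (h : List (List Int)) (M x y : Nat) (hy : M ≤ y + 1) : colSuf h M x y = -1 := by
  unfold colSuf
  rw [List.drop_of_length_le (by simpa using hy)]
  rfl

-- ---- a fold of row-local writes is one row update ----
theorem fold_set_row (L : List Int) (y : Int) (f : List Int → Int → Int) (g : List (List Int)) :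
    L.foldl (fun g x => pvSet2 g y x (f (g.getD y.toNat []) x)) g
      = g.set y.toNat (L.foldl (fun r x => r.set x.toNat (f r x)) (g.getD y.toNat [])) := by
  induction L generalizing g with
  | nil => exact (set_getD_self g y.toNat).symm
  | cons x xs ih =>
    simp only [List.foldl_cons]
    rw [show pvSet2 g y x (f (g.getD y.toNat []) x)
          = g.set y.toNat ((g.getD y.toNat []).set x.toNat (f (g.getD y.toNat []) x)) from rfl]
    rw [ih]
    rw [getD_set_self, List.set_set]

-- ---- outer loop over rows: each interior row transformed once, borders untouched ----
theorem grid_map_inv (M N : Nat) (F : Int → List Int → List Int) (k : Nat) (hk : k ≤ M) :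
    (((PySem.List.pyRange 1 (k : Int) 1).foldl
        (fun g y => g.set y.toNat (F y (g.getD y.toNat [])))
        ((List.range M).map (fun _ => List.replicate N (-1)))).length = M) ∧
    (∀ y, y < M →
      ((PySem.List.pyRange 1 (k : Int) 1).foldl
        (fun g y => g.set y.toNat (F y (g.getD y.toNat [])))
        ((List.range M).map (fun _ => List.replicate N (-1)))).getD y []
      = if 1 ≤ y ∧ y < k then F (y : Int) (List.replicate N (-1)) else List.replicate N (-1)) := by
  induction k with
  | zero =>
    rw [PySem.List.pyRange_one_eq_nil (by omega)]
    refine ⟨by simp, fun y hy => ?_⟩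
    simp only [List.foldl_nil]
    rw [List.getD_eq_getElem _ _ (by simpa using hy)]
    have : ¬(1 ≤ y ∧ y < 0) := by omega
    rw [if_neg this]
    simp
  | succ k ih =>
    by_cases hk0 : k = 0
    · subst hk0
      rw [show ((1:Nat):Int) = 1 by norm_num, PySem.List.pyRange_one_eq_nil (by omega)]
      refine ⟨by simp, fun y hy => ?_⟩
      simp only [List.foldl_nil]
      rw [List.getD_eq_getElem _ _ (by simpa using hy)]
      have : ¬(1 ≤ y ∧ y < 1) := by omega
      rw [if_neg this]
      simp
    · obtain ⟨ihlen, ihget⟩ := ih (by omega)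
      rw [show ((k+1:Nat):Int) = (k:Int)+1 by push_cast; ring,
          PySem.List.pyRange_one_succ_right (by exact_mod_cast Nat.one_le_iff_ne_zero.mpr hk0),
          List.foldl_append]
      simp only [List.foldl_cons, List.foldl_nil]
      have hkt : ((k:Int)).toNat = k := by omega
      rw [hkt]
      refine ⟨by rw [List.length_set]; exact ihlen, fun y hy => ?_⟩
      rw [ihget k (by omega)]
      have hnk : ¬(1 ≤ k ∧ k < k) := by omega
      rw [if_neg hnk]
      by_cases hyk : y = k
      · subst hyk
        rw [List.getD_eq_getElem _ _ (by simp only [List.length_set]; rw [ihlen]; omega)]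
        rw [List.getElem_set_self (by simp only [List.length_set]; rw [ihlen]; omega)]
        rw [if_pos (by omega)]
      · rw [List.getD_eq_getElem _ _ (by simp only [List.length_set]; rw [ihlen]; omega),
            List.getElem_set_ne (by omega) (by simp only [List.length_set]; rw [ihlen]; omega)]
        rw [← List.getD_eq_getElem _ _ (by rw [ihlen]; omega)]
        rw [ihget y hy]
        by_cases h1 : 1 ≤ y ∧ y < k
        · rw [if_pos h1, if_pos (by omega)]
        · rw [if_neg h1, if_neg (by omega)]

-- ---- the left row recurrence computes prefix maxima ----
theorem rowL_inv (hrow : List Int) (N : Nat) (hN : 3 ≤ N) (hlen : N - 2 ≤ hrow.length)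
    (k : Nat) (hk : k ≤ N - 1) :
    (((PySem.List.pyRange 1 (k : Int) 1).foldl
        (fun r x => r.set x.toNat (max (r.getD (x - 1).toNat 0) (hrow.getD (x - 1).toNat 0)))
        (List.replicate N (-1))).length = N) ∧
    (∀ j, j < N →
      ((PySem.List.pyRange 1 (k : Int) 1).foldl
        (fun r x => r.set x.toNat (max (r.getD (x - 1).toNat 0) (hrow.getD (x - 1).toNat 0)))
        (List.replicate N (-1))).getD j 0
      = if 1 ≤ j ∧ j < k then prefMax hrow j else -1) := by
  induction k with
  | zero =>
    rw [PySem.List.pyRange_one_eq_nil (by omega)]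
    refine ⟨by simp, fun j hj => ?_⟩
    rw [List.foldl_nil, if_neg (by omega), List.getD_eq_getElem _ _ (by simpa using hj)]
    simp
  | succ k ih =>
    by_cases hk0 : k = 0
    · subst hk0
      rw [show ((1:Nat):Int) = 1 by norm_num, PySem.List.pyRange_one_eq_nil (by omega)]
      refine ⟨by simp, fun j hj => ?_⟩
      rw [List.foldl_nil, if_neg (by omega), List.getD_eq_getElem _ _ (by simpa using hj)]
      simp
    · obtain ⟨ihlen, ihget⟩ := ih (by omega)
      rw [show ((k+1:Nat):Int) = (k:Int)+1 by push_cast; ring,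
          PySem.List.pyRange_one_succ_right (by exact_mod_cast Nat.one_le_iff_ne_zero.mpr hk0),
          List.foldl_append]
      simp only [List.foldl_cons, List.foldl_nil]
      have h1 : ((k:Int)).toNat = k := by omega
      have h2 : ((k:Int) - 1).toNat = k - 1 := by omega
      rw [h1, h2]
      have hread : (((PySem.List.pyRange 1 (k : Int) 1).foldl
          (fun r x => r.set x.toNat (max (r.getD (x - 1).toNat 0) (hrow.getD (x - 1).toNat 0)))
          (List.replicate N (-1))).getD (k-1) 0) = prefMax hrow (k-1) := by
        rw [ihget (k-1) (by omega)]
        by_cases h3 : 2 ≤ k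
        · rw [if_pos (by omega)]
        · have hk1 : k = 1 := by omega
          subst hk1
          rw [if_neg (by omega)]
          rfl
      rw [hread]
      have hval : max (prefMax hrow (k-1)) (hrow.getD (k-1) 0) = prefMax hrow k := by
        have := prefMax_succ hrow (k-1) (by omega)
        rw [show k - 1 + 1 = k by omega] at this
        exact this.symm
      rw [hval]
      refine ⟨by rw [List.length_set]; exact ihlen, fun j hj => ?_⟩
      rw [pvGetD_set, ihlen]
      by_cases hjk : k = j ∧ k < N
      · rw [if_pos hjk, if_pos (by omega)]
        rw [hjk.1]
      · rw [if_neg hjk, ihget j hj]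
        by_cases h4 : 1 ≤ j ∧ j < k
        · rw [if_pos h4, if_pos (by omega)]
        · rw [if_neg h4, if_neg (by omega)]

-- ---- the right row recurrence computes suffix maxima ----
theorem rowR_inv (hrow : List Int) (N : Nat) (hN : 3 ≤ N) (hlen : N ≤ hrow.length) :
    ∀ (a : Nat), a ≤ N - 2 → ∀ (r : List Int), r.length = N →
    (∀ j, j < N → r.getD j 0 = if a < j ∧ j < N - 1 then sufMax hrow N j else -1) →
    (((PySem.List.pyRange (a : Int) 0 (-1)).foldl
        (fun r x => r.set x.toNat (max (r.getD (x + 1).toNat 0) (hrow.getD (x + 1).toNat 0))) r).length = N) ∧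
    (∀ j, j < N →
      ((PySem.List.pyRange (a : Int) 0 (-1)).foldl
        (fun r x => r.set x.toNat (max (r.getD (x + 1).toNat 0) (hrow.getD (x + 1).toNat 0))) r).getD j 0
      = if 1 ≤ j ∧ j < N - 1 then sufMax hrow N j else -1) := by
  intro a
  induction a with
  | zero =>
    intro _ r hrN hr
    rw [show ((0:Nat):Int) = 0 by norm_num, PySem.List.pyRange_neg_one_eq_nil (by omega)]
    refine ⟨by simpa using hrN, fun j hj => ?_⟩
    rw [List.foldl_nil, hr j hj]
    by_cases h : 0 < j ∧ j < N - 1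
    · rw [if_pos h, if_pos (by omega)]
    · rw [if_neg h, if_neg (by omega)]
  | succ a ih =>
    intro ha r hrN hr
    rw [show ((a+1:Nat):Int) = (a:Int)+1 by push_cast; ring,
        PySem.List.pyRange_neg_one_cons (by omega)]
    simp only [List.foldl_cons]
    rw [show (a:Int) + 1 - 1 = (a:Int) by ring]
    have h1 : ((a:Int) + 1).toNat = a + 1 := by omega
    have h2 : ((a:Int) + 1 + 1).toNat = a + 2 := by omega
    rw [h1, h2]
    have hread : r.getD (a+2) 0 = sufMax hrow N (a+2) := by
      rw [hr (a+2) (by omega)]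
      by_cases h : a + 2 < N - 1
      · rw [if_pos (by omega)]
      · rw [if_neg (by omega), sufMax_last hrow N (a+2) (by omega)]
    rw [hread]
    have hval : max (sufMax hrow N (a+2)) (hrow.getD (a+2) 0) = sufMax hrow N (a+1) := by
      have := sufMax_succ hrow N (a+1) (by omega) hlen
      rw [show a + 1 + 1 = a + 2 by omega] at this
      exact this.symm
    rw [hval]
    refine ih (by omega) _ (by rw [List.length_set]; exact hrN) ?_
    intro j hj
    rw [pvGetD_set, hrN]
    by_cases hjk : a + 1 = j ∧ a + 1 < N
    · rw [if_pos hjk, if_pos (by omega)]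
      rw [← hjk.1]
    · rw [if_neg hjk, hr j hj]
      by_cases h4 : a + 1 < j ∧ j < N - 1
      · rw [if_pos (by omega), if_pos (by omega)]
      · rw [if_neg (by omega), if_neg (by omega)]

-- ---- inner top loop fills column x with column prefix maxima, leaves the rest alone ----
theorem topInner (h : List (List Int)) (M N x : Nat) (hx : x < N) (m : Nat) (hm : m ≤ M)
    (g : List (List Int)) (hg : g.length = M) (hrows : ∀ y, y < M → (g.getD y []).length = N)
    (hcol : ∀ y, y < M → (g.getD y []).getD x 0 = -1) :
    (((PySem.List.pyRange 1 (m : Int) 1).foldl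
        (fun g y => pvSet2 g y (x : Int) (max (pvGet2 g (y - 1) (x : Int)) (pvGet2 h (y - 1) (x : Int)))) g).length = M) ∧
    (∀ y, y < M → (((PySem.List.pyRange 1 (m : Int) 1).foldl
        (fun g y => pvSet2 g y (x : Int) (max (pvGet2 g (y - 1) (x : Int)) (pvGet2 h (y - 1) (x : Int)))) g).getD y []).length = N) ∧
    (∀ y, y < M → ∀ x', x' < N →
      (((PySem.List.pyRange 1 (m : Int) 1).foldl
        (fun g y => pvSet2 g y (x : Int) (max (pvGet2 g (y - 1) (x : Int)) (pvGet2 h (y - 1) (x : Int)))) g).getD y []).getD x' 0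
      = if x' = x ∧ 1 ≤ y ∧ y < m then colPref h x y else (g.getD y []).getD x' 0) := by
  induction m with
  | zero =>
    rw [PySem.List.pyRange_one_eq_nil (by omega)]
    exact ⟨hg, hrows, fun y hy x' hx' => by rw [List.foldl_nil, if_neg (by omega)]⟩
  | succ m ih =>
    by_cases hm0 : m = 0
    · subst hm0
      rw [show ((1:Nat):Int) = 1 by norm_num, PySem.List.pyRange_one_eq_nil (by omega)]
      exact ⟨hg, hrows, fun y hy x' hx' => by rw [List.foldl_nil, if_neg (by omega)]⟩
    · obtain ⟨ihlen, ihrows, ihget⟩ := ih (by omega)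
      rw [show ((m+1:Nat):Int) = (m:Int)+1 by push_cast; ring,
          PySem.List.pyRange_one_succ_right (by exact_mod_cast Nat.one_le_iff_ne_zero.mpr hm0),
          List.foldl_append]
      simp only [List.foldl_cons, List.foldl_nil]
      have h1 : ((m:Int)).toNat = m := by omega
      have h2 : ((m:Int) - 1).toNat = m - 1 := by omega
      have h3 : ((x:Nat):Int).toNat = x := by omega
      have hset : ∀ (G : List (List Int)) (v : Int), pvSet2 G ((m:Nat):Int) ((x:Nat):Int) v
          = G.set m ((G.getD m []).set x v) := fun G v => by unfold pvSet2; rw [h1, h3]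
      have hget : ∀ (G : List (List Int)), pvGet2 G ((m:Int) - 1) ((x:Nat):Int)
          = (G.getD (m-1) []).getD x 0 := fun G => by unfold pvGet2; rw [h2, h3]
      rw [hset, hget, hget]
      have hread : (((PySem.List.pyRange 1 (m : Int) 1).foldl
          (fun g y => pvSet2 g y (x : Int) (max (pvGet2 g (y - 1) (x : Int)) (pvGet2 h (y - 1) (x : Int)))) g).getD (m-1) []).getD x 0
          = colPref h x (m-1) := by
        rw [ihget (m-1) (by omega) x hx]
        by_cases hm2 : 2 ≤ m
        · rw [if_pos (by omega)]
        · have : m = 1 := by omega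
          subst this
          rw [if_neg (by omega), hcol 0 (by omega)]
          rfl
      rw [hread]
      have hval : max (colPref h x (m-1)) ((h.getD (m-1) []).getD x 0) = colPref h x m := by
        have := colPref_succ h x (m-1)
        rw [show m - 1 + 1 = m by omega] at this
        exact this.symm
      rw [hval]
      refine ⟨by rw [List.length_set]; exact ihlen, fun y hy => ?_, fun y hy x' hx' => ?_⟩
      · rw [pvGetD_set, ihlen]
        by_cases hym : m = y ∧ m < M
        · obtain ⟨hym1, _⟩ := hym
          rw [if_pos ⟨hym1, by omega⟩, List.length_set]
          exact ihrows m (by omega)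
        · rw [if_neg hym]
          exact ihrows y hy
      · rw [pvGetD_set, ihlen]
        by_cases hym : m = y ∧ m < M
        · rw [if_pos hym, pvGetD_set, ihrows m (by omega)]
          obtain ⟨hym1, hym2⟩ := hym
          subst hym1
          by_cases hxx : x = x' ∧ x < N
          · rw [if_pos hxx, if_pos (by omega)]
          · rw [if_neg hxx, ihget m (by omega) x' hx', if_neg (by omega), if_neg (by omega)]
        · rw [if_neg hym, ihget y hy x' hx']
          by_cases hc : x' = x ∧ 1 ≤ y ∧ y < m
          · rw [if_pos hc, if_pos (by omega)]
          · rw [if_neg hc, if_neg (by omega)]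

-- ---- inner bottom loop fills column x with column suffix maxima, leaves the rest alone ----
theorem botInner (h : List (List Int)) (M N x : Nat) (hx : x < N) :
    ∀ (a : Nat), a + 2 ≤ M → ∀ (g : List (List Int)) (ψ : Nat → Nat → Int),
    g.length = M → (∀ y, y < M → (g.getD y []).length = N) →
    (∀ y, y < M → ψ y x = -1) →
    (∀ y, y < M → ∀ x', x' < N →
      (g.getD y []).getD x' 0 = if x' = x ∧ a < y ∧ y < M - 1 then colSuf h M x y else ψ y x') →
    (((PySem.List.pyRange (a : Int) 0 (-1)).foldl
        (fun g y => pvSet2 g y (x : Int) (max (pvGet2 g (y + 1) (x : Int)) (pvGet2 h (y + 1) (x : Int)))) g).length = M) ∧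
    (∀ y, y < M → (((PySem.List.pyRange (a : Int) 0 (-1)).foldl
        (fun g y => pvSet2 g y (x : Int) (max (pvGet2 g (y + 1) (x : Int)) (pvGet2 h (y + 1) (x : Int)))) g).getD y []).length = N) ∧
    (∀ y, y < M → ∀ x', x' < N →
      (((PySem.List.pyRange (a : Int) 0 (-1)).foldl
        (fun g y => pvSet2 g y (x : Int) (max (pvGet2 g (y + 1) (x : Int)) (pvGet2 h (y + 1) (x : Int)))) g).getD y []).getD x' 0
      = if x' = x ∧ 1 ≤ y ∧ y < M - 1 then colSuf h M x y else ψ y x') := by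
  intro a
  induction a with
  | zero =>
    intro ha g ψ hg hrows hψ hcell
    rw [show ((0:Nat):Int) = 0 by norm_num, PySem.List.pyRange_neg_one_eq_nil (by omega)]
    refine ⟨hg, hrows, fun y hy x' hx' => ?_⟩
    rw [List.foldl_nil, hcell y hy x' hx']
    by_cases hc : x' = x ∧ 0 < y ∧ y < M - 1
    · rw [if_pos hc, if_pos (by omega)]
    · rw [if_neg hc, if_neg (by omega)]
  | succ a ih =>
    intro ha g ψ hg hrows hψ hcell
    rw [show ((a+1:Nat):Int) = (a:Int)+1 by push_cast; ring,
        PySem.List.pyRange_neg_one_cons (by omega)]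
    simp only [List.foldl_cons]
    rw [show (a:Int) + 1 - 1 = (a:Int) by ring]
    have h1 : ((a:Int) + 1).toNat = a + 1 := by omega
    have h2 : ((a:Int) + 1 + 1).toNat = a + 2 := by omega
    have h3 : ((x:Nat):Int).toNat = x := by omega
    have hset : ∀ (G : List (List Int)) (v : Int), pvSet2 G ((a:Int) + 1) ((x:Nat):Int) v
        = G.set (a+1) ((G.getD (a+1) []).set x v) := fun G v => by unfold pvSet2; rw [h1, h3]
    have hget : ∀ (G : List (List Int)), pvGet2 G ((a:Int) + 1 + 1) ((x:Nat):Int)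
        = (G.getD (a+2) []).getD x 0 := fun G => by unfold pvGet2; rw [h2, h3]
    rw [hset, hget, hget]
    have hread : (g.getD (a+2) []).getD x 0 = colSuf h M x (a+2) := by
      rw [hcell (a+2) (by omega) x hx]
      by_cases hc : a + 2 < M - 1
      · rw [if_pos (by omega)]
      · rw [if_neg (by omega), hψ (a+2) (by omega), colSuf_last h M x (a+2) (by omega)]
    rw [hread]
    have hval : max (colSuf h M x (a+2)) ((h.getD (a+2) []).getD x 0) = colSuf h M x (a+1) := by
      have := colSuf_succ h M x (a+1) (by omega)
      rw [show a + 1 + 1 = a + 2 by omega] at this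
      exact this.symm
    rw [hval]
    refine ih (by omega) _ ψ (by rw [List.length_set]; exact hg) ?_ hψ ?_
    · intro y hy
      rw [pvGetD_set, hg]
      by_cases hym : a + 1 = y ∧ a + 1 < M
      · obtain ⟨hym1, _⟩ := hym
        rw [if_pos ⟨hym1, by omega⟩, List.length_set]
        exact hrows (a+1) (by omega)
      · rw [if_neg hym]
        exact hrows y hy
    · intro y hy x' hx'
      rw [pvGetD_set, hg]
      by_cases hym : a + 1 = y ∧ a + 1 < M
      · rw [if_pos hym, pvGetD_set, hrows (a+1) (by omega)]
        obtain ⟨hym1, _⟩ := hym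
        subst hym1
        by_cases hxx : x = x' ∧ x < N
        · rw [if_pos hxx, if_pos (by omega)]
        · rw [if_neg hxx, hcell (a+1) (by omega) x' hx', if_neg (by omega), if_neg (by omega)]
      · rw [if_neg hym, hcell y hy x' hx']
        by_cases hc : x' = x ∧ a + 1 < y ∧ y < M - 1
        · rw [if_pos (by omega), if_pos (by omega)]
        · rw [if_neg (by omega), if_neg (by omega)]

-- ---- outer top loop: columns filled left to right ----
theorem topOuter (h : List (List Int)) (M N : Nat) (hM : 3 ≤ M) (hN : 3 ≤ N)
    (k : Nat) (hk : k ≤ N - 1) :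
    (((PySem.List.pyRange 1 (k : Int) 1).foldl
        (fun g x => (PySem.List.pyRange 1 ((M - 1 : Nat) : Int) 1).foldl
          (fun g y => pvSet2 g y x (max (pvGet2 g (y - 1) x) (pvGet2 h (y - 1) x))) g)
        ((List.range M).map (fun _ => List.replicate N (-1)))).length = M) ∧
    (∀ y, y < M → (((PySem.List.pyRange 1 (k : Int) 1).foldl
        (fun g x => (PySem.List.pyRange 1 ((M - 1 : Nat) : Int) 1).foldl
          (fun g y => pvSet2 g y x (max (pvGet2 g (y - 1) x) (pvGet2 h (y - 1) x))) g)
        ((List.range M).map (fun _ => List.replicate N (-1)))).getD y []).length = N) ∧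
    (∀ y, y < M → ∀ x', x' < N →
      (((PySem.List.pyRange 1 (k : Int) 1).foldl
        (fun g x => (PySem.List.pyRange 1 ((M - 1 : Nat) : Int) 1).foldl
          (fun g y => pvSet2 g y x (max (pvGet2 g (y - 1) x) (pvGet2 h (y - 1) x))) g)
        ((List.range M).map (fun _ => List.replicate N (-1)))).getD y []).getD x' 0
      = if 1 ≤ x' ∧ x' < k ∧ 1 ≤ y ∧ y < M - 1 then colPref h x' y else -1) := by
  have hinit_len : ((List.range M).map (fun _ => List.replicate N (-1) : Nat → List Int)).length = M := by simp
  have hinit_row : ∀ y, y < M →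
      (((List.range M).map (fun _ => List.replicate N (-1) : Nat → List Int)).getD y []) = List.replicate N (-1) := by
    intro y hy
    rw [List.getD_eq_getElem _ _ (by simpa using hy)]
    simp
  induction k with
  | zero =>
    rw [show PySem.List.pyRange 1 ((0:Nat):Int) 1 = ([] : List Int) from PySem.List.pyRange_one_eq_nil (by norm_num)]
    refine ⟨hinit_len, fun y hy => ?_, fun y hy x' hx' => ?_⟩
    · rw [List.foldl_nil, hinit_row y hy]
      simp
    · rw [List.foldl_nil, hinit_row y hy, if_neg (by omega)]
      rw [List.getD_eq_getElem _ _ (by simpa using hx')]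
      simp
  | succ k ih =>
    by_cases hk0 : k = 0
    · subst hk0
      rw [show PySem.List.pyRange 1 ((1:Nat):Int) 1 = ([] : List Int) from PySem.List.pyRange_one_eq_nil (by norm_num)]
      refine ⟨hinit_len, fun y hy => ?_, fun y hy x' hx' => ?_⟩
      · rw [List.foldl_nil, hinit_row y hy]
        simp
      · rw [List.foldl_nil, hinit_row y hy, if_neg (by omega)]
        rw [List.getD_eq_getElem _ _ (by simpa using hx')]
        simp
    · obtain ⟨ihlen, ihrows, ihget⟩ := ih (by omega)
      rw [show ((k+1:Nat):Int) = (k:Int)+1 by push_cast; ring,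
          PySem.List.pyRange_one_succ_right (by exact_mod_cast Nat.one_le_iff_ne_zero.mpr hk0),
          List.foldl_append]
      simp only [List.foldl_cons, List.foldl_nil]
      obtain ⟨tlen, trows, tget⟩ := topInner h M N k (by omega) (M - 1) (by omega) _
        ihlen ihrows (fun y hy => by rw [ihget y hy k (by omega), if_neg (by omega)])
      refine ⟨tlen, trows, fun y hy x' hx' => ?_⟩
      rw [tget y hy x' hx']
      by_cases hc : x' = k ∧ 1 ≤ y ∧ y < M - 1
      · rw [if_pos hc, if_pos (by omega), hc.1]
      · rw [if_neg hc, ihget y hy x' hx']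
        by_cases hc2 : 1 ≤ x' ∧ x' < k ∧ 1 ≤ y ∧ y < M - 1
        · rw [if_pos hc2, if_pos (by omega)]
        · rw [if_neg hc2, if_neg (by omega)]

-- ---- outer bottom loop: columns filled left to right ----
theorem botOuter (h : List (List Int)) (M N : Nat) (hM : 3 ≤ M) (hN : 3 ≤ N)
    (k : Nat) (hk : k ≤ N - 1) :
    (((PySem.List.pyRange 1 (k : Int) 1).foldl
        (fun g x => (PySem.List.pyRange ((M - 2 : Nat) : Int) 0 (-1)).foldl
          (fun g y => pvSet2 g y x (max (pvGet2 g (y + 1) x) (pvGet2 h (y + 1) x))) g)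
        ((List.range M).map (fun _ => List.replicate N (-1)))).length = M) ∧
    (∀ y, y < M → (((PySem.List.pyRange 1 (k : Int) 1).foldl
        (fun g x => (PySem.List.pyRange ((M - 2 : Nat) : Int) 0 (-1)).foldl
          (fun g y => pvSet2 g y x (max (pvGet2 g (y + 1) x) (pvGet2 h (y + 1) x))) g)
        ((List.range M).map (fun _ => List.replicate N (-1)))).getD y []).length = N) ∧
    (∀ y, y < M → ∀ x', x' < N →
      (((PySem.List.pyRange 1 (k : Int) 1).foldl
        (fun g x => (PySem.List.pyRange ((M - 2 : Nat) : Int) 0 (-1)).foldl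
          (fun g y => pvSet2 g y x (max (pvGet2 g (y + 1) x) (pvGet2 h (y + 1) x))) g)
        ((List.range M).map (fun _ => List.replicate N (-1)))).getD y []).getD x' 0
      = if 1 ≤ x' ∧ x' < k ∧ 1 ≤ y ∧ y < M - 1 then colSuf h M x' y else -1) := by
  have hinit_len : ((List.range M).map (fun _ => List.replicate N (-1) : Nat → List Int)).length = M := by simp
  have hinit_row : ∀ y, y < M →
      (((List.range M).map (fun _ => List.replicate N (-1) : Nat → List Int)).getD y []) = List.replicate N (-1) := by
    intro y hy
    rw [List.getD_eq_getElem _ _ (by simpa using hy)]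
    simp
  induction k with
  | zero =>
    rw [show PySem.List.pyRange 1 ((0:Nat):Int) 1 = ([] : List Int) from PySem.List.pyRange_one_eq_nil (by norm_num)]
    refine ⟨hinit_len, fun y hy => ?_, fun y hy x' hx' => ?_⟩
    · rw [List.foldl_nil, hinit_row y hy]
      simp
    · rw [List.foldl_nil, hinit_row y hy, if_neg (by omega)]
      rw [List.getD_eq_getElem _ _ (by simpa using hx')]
      simp
  | succ k ih =>
    by_cases hk0 : k = 0
    · subst hk0
      rw [show PySem.List.pyRange 1 ((1:Nat):Int) 1 = ([] : List Int) from PySem.List.pyRange_one_eq_nil (by norm_num)]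
      refine ⟨hinit_len, fun y hy => ?_, fun y hy x' hx' => ?_⟩
      · rw [List.foldl_nil, hinit_row y hy]
        simp
      · rw [List.foldl_nil, hinit_row y hy, if_neg (by omega)]
        rw [List.getD_eq_getElem _ _ (by simpa using hx')]
        simp
    · obtain ⟨ihlen, ihrows, ihget⟩ := ih (by omega)
      rw [show ((k+1:Nat):Int) = (k:Int)+1 by push_cast; ring,
          PySem.List.pyRange_one_succ_right (by exact_mod_cast Nat.one_le_iff_ne_zero.mpr hk0),
          List.foldl_append]
      simp only [List.foldl_cons, List.foldl_nil]
      obtain ⟨tlen, trows, tget⟩ := botInner h M N k (by omega) (M - 2) (by omega) _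
        (fun y x' => (((PySem.List.pyRange 1 (k : Int) 1).foldl
          (fun g x => (PySem.List.pyRange ((M - 2 : Nat) : Int) 0 (-1)).foldl
            (fun g y => pvSet2 g y x (max (pvGet2 g (y + 1) x) (pvGet2 h (y + 1) x))) g)
          ((List.range M).map (fun _ => List.replicate N (-1)))).getD y []).getD x' 0)
        ihlen ihrows
        (fun y hy => by beta_reduce; rw [ihget y hy k (by omega), if_neg (by omega)])
        (fun y hy x' hx' => by beta_reduce; rw [if_neg (by omega)])
      refine ⟨tlen, trows, fun y hy x' hx' => ?_⟩
      rw [tget y hy x' hx']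
      by_cases hc : x' = k ∧ 1 ≤ y ∧ y < M - 1
      · rw [if_pos hc, if_pos (by omega), hc.1]
      · rw [if_neg hc, ihget y hy x' hx']
        by_cases hc2 : 1 ≤ x' ∧ x' < k ∧ 1 ≤ y ∧ y < M - 1
        · rw [if_pos hc2, if_pos (by omega)]
        · rw [if_neg hc2, if_neg (by omega)]

-- ---- elementwise grid equality ----
theorem grid_ext (G1 G2 : List (List Int)) (M N : Nat) (l1 : G1.length = M) (l2 : G2.length = M)
    (r1 : ∀ y, y < M → (G1.getD y []).length = N) (r2 : ∀ y, y < M → (G2.getD y []).length = N)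
    (c : ∀ y, y < M → ∀ x, x < N → (G1.getD y []).getD x 0 = (G2.getD y []).getD x 0) : G1 = G2 := by
  apply List.ext_getElem (by omega)
  intro y hy1 hy2
  rw [← List.getD_eq_getElem G1 [] hy1, ← List.getD_eq_getElem G2 [] hy2]
  apply List.ext_getElem (by rw [r1 y (by omega), r2 y (by omega)])
  intro x hx1 hx2
  rw [← List.getD_eq_getElem _ 0 hx1, ← List.getD_eq_getElem _ 0 hx2]
  exact c y (by omega) x (by rw [r1 y (by omega)] at hx1; omega)

-- ---- B-side access lemmas ----
theorem mapgrid_len (M N : Nat) (f : Nat → Nat → Int) :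
    ((List.range M).map (fun y => (List.range N).map (fun x => f y x))).length = M := by simp

theorem mapgrid_row (M N : Nat) (f : Nat → Nat → Int) (y : Nat) (hy : y < M) :
    ((List.range M).map (fun y => (List.range N).map (fun x => f y x))).getD y []
      = (List.range N).map (fun x => f y x) := by
  rw [List.getD_eq_getElem _ _ (by simpa using hy)]
  simp

theorem maprow_cell (N : Nat) (f : Nat → Int) (x : Nat) (hx : x < N) :
    ((List.range N).map (fun x => f x)).getD x 0 = f x := by
  rw [List.getD_eq_getElem _ _ (by simpa using hx)]
  simp

theorem pvInterior_true (M N y x : Nat) (hc : 0 < y ∧ y + 1 < M ∧ 0 < x ∧ x + 1 < N) :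
    pvInterior M N y x = true := by
  simp [pvInterior]
  omega

theorem pvInterior_false (M N y x : Nat) (hc : ¬(0 < y ∧ y + 1 < M ∧ 0 < x ∧ x + 1 < N)) :
    pvInterior M N y x = false := by
  simp [pvInterior]
  omega

theorem replicate_getD (N j : Nat) (hj : j < N) : (List.replicate N (-1 : Int)).getD j 0 = -1 := by
  rw [List.getD_eq_getElem _ _ (by simpa using hj)]
  simp

-- ---- the four grids of each port, as standalone expressions ----
def initG (h : List (List Int)) : List (List Int) :=
  (List.range h.length).map (fun _ => List.replicate ((h.getD 0 []).length) (-1))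

def leftA (h : List (List Int)) : List (List Int) :=
  (PySem.List.pyRange 1 ((h.length : Int) - 1) 1).foldl (fun g y =>
    (PySem.List.pyRange 1 (((h.getD 0 []).length : Int) - 1) 1).foldl (fun g x =>
      pvSet2 g y x (max (pvGet2 g y (x - 1)) (pvGet2 h y (x - 1)))) g) (initG h)

def topA (h : List (List Int)) : List (List Int) :=
  (PySem.List.pyRange 1 (((h.getD 0 []).length : Int) - 1) 1).foldl (fun g x =>
    (PySem.List.pyRange 1 ((h.length : Int) - 1) 1).foldl (fun g y =>
      pvSet2 g y x (max (pvGet2 g (y - 1) x) (pvGet2 h (y - 1) x))) g) (initG h)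

def rightA (h : List (List Int)) : List (List Int) :=
  (PySem.List.pyRange 1 ((h.length : Int) - 1) 1).foldl (fun g y =>
    (PySem.List.pyRange (((h.getD 0 []).length : Int) - 2) 0 (-1)).foldl (fun g x =>
      pvSet2 g y x (max (pvGet2 g y (x + 1)) (pvGet2 h y (x + 1)))) g) (initG h)

def botA (h : List (List Int)) : List (List Int) :=
  (PySem.List.pyRange 1 (((h.getD 0 []).length : Int) - 1) 1).foldl (fun g x =>
    (PySem.List.pyRange ((h.length : Int) - 2) 0 (-1)).foldl (fun g y =>
      pvSet2 g y x (max (pvGet2 g (y + 1) x) (pvGet2 h (y + 1) x))) g) (initG h)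

def leftB (h : List (List Int)) : List (List Int) :=
  (List.range h.length).map (fun y => (List.range ((h.getD 0 []).length)).map (fun x =>
    if pvInterior h.length ((h.getD 0 []).length) y x then pvFoldMax ((h.getD y []).take x) else -1))

def topB (h : List (List Int)) : List (List Int) :=
  (List.range h.length).map (fun y => (List.range ((h.getD 0 []).length)).map (fun x =>
    if pvInterior h.length ((h.getD 0 []).length) y x then pvFoldMax ((List.range y).map (fun k => (h.getD k []).getD x 0)) else -1))

def rightB (h : List (List Int)) : List (List Int) :=
  (List.range h.length).map (fun y => (List.range ((h.getD 0 []).length)).map (fun x =>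
    if pvInterior h.length ((h.getD 0 []).length) y x then pvFoldMax (((h.getD y []).take ((h.getD 0 []).length)).drop (x + 1)) else -1))

def botB (h : List (List Int)) : List (List Int) :=
  (List.range h.length).map (fun y => (List.range ((h.getD 0 []).length)).map (fun x =>
    if pvInterior h.length ((h.getD 0 []).length) y x then pvFoldMax (((List.range h.length).drop (y + 1)).map (fun k => (h.getD k []).getD x 0)) else -1))

-- ---- B-side characterization, shared by all four grids ----
theorem Bgrid_char (M N : Nat) (f : Nat → Nat → Int) :
    (((List.range M).map (fun y => (List.range N).map (fun x => f y x))).length = M) ∧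
    (∀ y, y < M → (((List.range M).map (fun y => (List.range N).map (fun x => f y x))).getD y []).length = N) ∧
    (∀ y, y < M → ∀ x, x < N →
      (((List.range M).map (fun y => (List.range N).map (fun x => f y x))).getD y []).getD x 0 = f y x) := by
  refine ⟨mapgrid_len M N f, fun y hy => ?_, fun y hy x hx => ?_⟩
  · rw [mapgrid_row M N f y hy]
    simp
  · rw [mapgrid_row M N f y hy, maprow_cell N (f y) x hx]

theorem initG_row (h : List (List Int)) (y : Nat) (hy : y < h.length) :
    (initG h).getD y [] = List.replicate ((h.getD 0 []).length) (-1) := by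
  unfold initG
  have hlen : y < ((List.range h.length).map (fun _ => List.replicate ((h.getD 0 []).length) (-1 : Int))).length := by
    rw [List.length_map, List.length_range]
    exact hy
  rw [List.getD_eq_getElem _ _ hlen]
  simp

-- ---- degenerate grids: no interior, everything is -1 on both sides ----
theorem deg_eq (h : List (List Int)) (f : Nat → Nat → Int)
    (hdeg : ¬(3 ≤ h.length ∧ 3 ≤ (h.getD 0 []).length)) :
    initG h = (List.range h.length).map (fun y => (List.range ((h.getD 0 []).length)).map (fun x =>
      if pvInterior h.length ((h.getD 0 []).length) y x then f y x else -1)) := by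
  obtain ⟨blen, brows, bcell⟩ := Bgrid_char h.length ((h.getD 0 []).length)
    (fun y x => if pvInterior h.length ((h.getD 0 []).length) y x then f y x else -1)
  apply grid_ext _ _ h.length ((h.getD 0 []).length) (by simp [initG]) blen
    (fun y hy => ?_) brows (fun y hy x hx => ?_)
  · rw [initG_row h y hy]
    simp
  · rw [bcell y hy x hx, pvInterior_false _ _ _ _ (by omega), if_neg (by simp)]
    rw [initG_row h y hy]
    exact replicate_getD _ x hx

-- ---- LEFT ----
theorem left_eq (h : List (List Int)) (pre : Pre_buildVisibilityMapsFromOutside h) :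
    leftA h = leftB h := by
  obtain ⟨hne, hPre⟩ := pre
  by_cases hMN : 3 ≤ h.length ∧ 3 ≤ (h.getD 0 []).length
  · obtain ⟨hM, hN⟩ := hMN
    obtain ⟨hmid, hlast⟩ := hPre hM hN
    obtain ⟨blen, brows, bcell⟩ := Bgrid_char h.length ((h.getD 0 []).length)
      (fun y x => if pvInterior h.length ((h.getD 0 []).length) y x then pvFoldMax ((h.getD y []).take x) else -1)
    unfold leftA initG
    simp only [show ((h.length : Int) - 1) = ((h.length - 1 : Nat) : Int) by omega,
               show (((h.getD 0 []).length : Int) - 1) = (((h.getD 0 []).length - 1 : Nat) : Int) by omega]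
    rw [show (fun (g : List (List Int)) (y : Int) =>
          (PySem.List.pyRange 1 (((h.getD 0 []).length - 1 : Nat) : Int) 1).foldl (fun g x =>
            pvSet2 g y x (max (pvGet2 g y (x - 1)) (pvGet2 h y (x - 1)))) g)
        = (fun (g : List (List Int)) (y : Int) => g.set y.toNat
            ((PySem.List.pyRange 1 (((h.getD 0 []).length - 1 : Nat) : Int) 1).foldl (fun r x =>
              r.set x.toNat (max (r.getD (x - 1).toNat 0) ((h.getD y.toNat []).getD (x - 1).toNat 0))) (g.getD y.toNat [])))
        from funext fun g => funext fun y =>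
          fold_set_row _ y (fun r x => max (r.getD (x - 1).toNat 0) ((h.getD y.toNat []).getD (x - 1).toNat 0)) g]
    obtain ⟨glen, gget⟩ := grid_map_inv h.length ((h.getD 0 []).length)
      (fun y r => (PySem.List.pyRange 1 (((h.getD 0 []).length - 1 : Nat) : Int) 1).foldl (fun r x =>
        r.set x.toNat (max (r.getD (x - 1).toNat 0) ((h.getD y.toNat []).getD (x - 1).toNat 0))) r)
      (h.length - 1) (by omega)
    apply grid_ext _ _ h.length ((h.getD 0 []).length) glen blen (fun y hy => ?_) brows (fun y hy x hx => ?_)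
    · rw [gget y hy]
      by_cases hyi : 1 ≤ y ∧ y < h.length - 1
      · rw [if_pos hyi]
        exact (rowL_inv (h.getD y []) ((h.getD 0 []).length) hN
          (by have := hmid y (by omega) (by omega) (by omega); omega)
          ((h.getD 0 []).length - 1) (by omega)).1
      · rw [if_neg hyi]
        simp
    · rw [gget y hy, bcell y hy x hx]
      simp only [Int.toNat_natCast]
      by_cases hyi : 1 ≤ y ∧ y < h.length - 1
      · rw [if_pos hyi]
        rw [(rowL_inv (h.getD y []) ((h.getD 0 []).length) hN
          (by have := hmid y (by omega) (by omega) (by omega); omega)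
          ((h.getD 0 []).length - 1) (by omega)).2 x hx]
        by_cases hxi : 1 ≤ x ∧ x < (h.getD 0 []).length - 1
        · rw [if_pos hxi, if_pos (pvInterior_true _ _ _ _ (by omega))]
          rfl
        · rw [if_neg hxi, if_neg (by rw [pvInterior_false _ _ _ _ (by omega)]; simp)]
      · rw [if_neg hyi, if_neg (by rw [pvInterior_false _ _ _ _ (by omega)]; simp)]
        exact replicate_getD _ x hx
  · have hA : leftA h = initG h := by
      unfold leftA
      by_cases hM3 : 3 ≤ h.length
      · simp only [show PySem.List.pyRange 1 (((h.getD 0 []).length : Int) - 1) 1 = ([] : List Int)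
            from PySem.List.pyRange_one_eq_nil (by omega), List.foldl_nil]
        exact foldl_id _ _
      · rw [show PySem.List.pyRange 1 ((h.length : Int) - 1) 1 = ([] : List Int)
            from PySem.List.pyRange_one_eq_nil (by omega), List.foldl_nil]
    rw [hA]
    exact deg_eq h _ hMN

-- ---- RIGHT ----
theorem right_eq (h : List (List Int)) (pre : Pre_buildVisibilityMapsFromOutside h) :
    rightA h = rightB h := by
  obtain ⟨hne, hPre⟩ := pre
  by_cases hMN : 3 ≤ h.length ∧ 3 ≤ (h.getD 0 []).length
  · obtain ⟨hM, hN⟩ := hMN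
    obtain ⟨hmid, hlast⟩ := hPre hM hN
    obtain ⟨blen, brows, bcell⟩ := Bgrid_char h.length ((h.getD 0 []).length)
      (fun y x => if pvInterior h.length ((h.getD 0 []).length) y x then pvFoldMax (((h.getD y []).take ((h.getD 0 []).length)).drop (x + 1)) else -1)
    unfold rightA initG
    simp only [show ((h.length : Int) - 1) = ((h.length - 1 : Nat) : Int) by omega,
               show (((h.getD 0 []).length : Int) - 2) = (((h.getD 0 []).length - 2 : Nat) : Int) by omega]
    rw [show (fun (g : List (List Int)) (y : Int) =>
          (PySem.List.pyRange (((h.getD 0 []).length - 2 : Nat) : Int) 0 (-1)).foldl (fun g x =>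
            pvSet2 g y x (max (pvGet2 g y (x + 1)) (pvGet2 h y (x + 1)))) g)
        = (fun (g : List (List Int)) (y : Int) => g.set y.toNat
            ((PySem.List.pyRange (((h.getD 0 []).length - 2 : Nat) : Int) 0 (-1)).foldl (fun r x =>
              r.set x.toNat (max (r.getD (x + 1).toNat 0) ((h.getD y.toNat []).getD (x + 1).toNat 0))) (g.getD y.toNat [])))
        from funext fun g => funext fun y =>
          fold_set_row _ y (fun r x => max (r.getD (x + 1).toNat 0) ((h.getD y.toNat []).getD (x + 1).toNat 0)) g]
    obtain ⟨glen, gget⟩ := grid_map_inv h.length ((h.getD 0 []).length)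
      (fun y r => (PySem.List.pyRange (((h.getD 0 []).length - 2 : Nat) : Int) 0 (-1)).foldl (fun r x =>
        r.set x.toNat (max (r.getD (x + 1).toNat 0) ((h.getD y.toNat []).getD (x + 1).toNat 0))) r)
      (h.length - 1) (by omega)
    apply grid_ext _ _ h.length ((h.getD 0 []).length) glen blen (fun y hy => ?_) brows (fun y hy x hx => ?_)
    · rw [gget y hy]
      by_cases hyi : 1 ≤ y ∧ y < h.length - 1
      · rw [if_pos hyi]
        exact (rowR_inv (h.getD y []) ((h.getD 0 []).length) hN
          (hmid y (by omega) (by omega) (by omega))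
          ((h.getD 0 []).length - 2) (by omega) (List.replicate ((h.getD 0 []).length) (-1))
          (by simp) (fun j hj => by rw [if_neg (by omega)]; exact replicate_getD _ j hj)).1
      · rw [if_neg hyi]
        simp
    · rw [gget y hy, bcell y hy x hx]
      simp only [Int.toNat_natCast]
      by_cases hyi : 1 ≤ y ∧ y < h.length - 1
      · rw [if_pos hyi]
        rw [(rowR_inv (h.getD y []) ((h.getD 0 []).length) hN
          (hmid y (by omega) (by omega) (by omega))
          ((h.getD 0 []).length - 2) (by omega) (List.replicate ((h.getD 0 []).length) (-1))
          (by simp) (fun j hj => by rw [if_neg (by omega)]; exact replicate_getD _ j hj)).2 x hx]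
        by_cases hxi : 1 ≤ x ∧ x < (h.getD 0 []).length - 1
        · rw [if_pos hxi, if_pos (pvInterior_true _ _ _ _ (by omega))]
          rfl
        · rw [if_neg hxi, if_neg (by rw [pvInterior_false _ _ _ _ (by omega)]; simp)]
      · rw [if_neg hyi, if_neg (by rw [pvInterior_false _ _ _ _ (by omega)]; simp)]
        exact replicate_getD _ x hx
  · have hA : rightA h = initG h := by
      unfold rightA
      by_cases hM3 : 3 ≤ h.length
      · simp only [show PySem.List.pyRange (((h.getD 0 []).length : Int) - 2) 0 (-1) = ([] : List Int)
            from PySem.List.pyRange_neg_one_eq_nil (by omega), List.foldl_nil]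
        exact foldl_id _ _
      · rw [show PySem.List.pyRange 1 ((h.length : Int) - 1) 1 = ([] : List Int)
            from PySem.List.pyRange_one_eq_nil (by omega), List.foldl_nil]
    rw [hA]
    exact deg_eq h _ hMN

-- ---- TOP ----
theorem top_eq (h : List (List Int)) (pre : Pre_buildVisibilityMapsFromOutside h) :
    topA h = topB h := by
  obtain ⟨hne, hPre⟩ := pre
  by_cases hMN : 3 ≤ h.length ∧ 3 ≤ (h.getD 0 []).length
  · obtain ⟨hM, hN⟩ := hMN
    obtain ⟨blen, brows, bcell⟩ := Bgrid_char h.length ((h.getD 0 []).length)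
      (fun y x => if pvInterior h.length ((h.getD 0 []).length) y x then pvFoldMax ((List.range y).map (fun k => (h.getD k []).getD x 0)) else -1)
    unfold topA initG
    simp only [show ((h.length : Int) - 1) = ((h.length - 1 : Nat) : Int) by omega,
               show (((h.getD 0 []).length : Int) - 1) = (((h.getD 0 []).length - 1 : Nat) : Int) by omega]
    obtain ⟨glen, grows, gget⟩ := topOuter h h.length ((h.getD 0 []).length) hM hN
      ((h.getD 0 []).length - 1) (by omega)
    apply grid_ext _ _ h.length ((h.getD 0 []).length) glen blen grows brows (fun y hy x hx => ?_)
    rw [gget y hy x hx, bcell y hy x hx]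
    by_cases hin : 1 ≤ x ∧ x < (h.getD 0 []).length - 1 ∧ 1 ≤ y ∧ y < h.length - 1
    · rw [if_pos hin, if_pos (pvInterior_true _ _ _ _ (by omega))]
      rfl
    · rw [if_neg hin, if_neg (by rw [pvInterior_false _ _ _ _ (by omega)]; simp)]
  · have hA : topA h = initG h := by
      unfold topA
      by_cases hN3 : 3 ≤ (h.getD 0 []).length
      · simp only [show PySem.List.pyRange 1 ((h.length : Int) - 1) 1 = ([] : List Int)
            from PySem.List.pyRange_one_eq_nil (by omega), List.foldl_nil]
        exact foldl_id _ _
      · rw [show PySem.List.pyRange 1 (((h.getD 0 []).length : Int) - 1) 1 = ([] : List Int)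
            from PySem.List.pyRange_one_eq_nil (by omega), List.foldl_nil]
    rw [hA]
    exact deg_eq h _ hMN

-- ---- BOTTOM ----
theorem bot_eq (h : List (List Int)) (pre : Pre_buildVisibilityMapsFromOutside h) :
    botA h = botB h := by
  obtain ⟨hne, hPre⟩ := pre
  by_cases hMN : 3 ≤ h.length ∧ 3 ≤ (h.getD 0 []).length
  · obtain ⟨hM, hN⟩ := hMN
    obtain ⟨blen, brows, bcell⟩ := Bgrid_char h.length ((h.getD 0 []).length)
      (fun y x => if pvInterior h.length ((h.getD 0 []).length) y x then pvFoldMax (((List.range h.length).drop (y + 1)).map (fun k => (h.getD k []).getD x 0)) else -1)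
    unfold botA initG
    simp only [show ((h.length : Int) - 2) = ((h.length - 2 : Nat) : Int) by omega,
               show (((h.getD 0 []).length : Int) - 1) = (((h.getD 0 []).length - 1 : Nat) : Int) by omega]
    obtain ⟨glen, grows, gget⟩ := botOuter h h.length ((h.getD 0 []).length) hM hN
      ((h.getD 0 []).length - 1) (by omega)
    apply grid_ext _ _ h.length ((h.getD 0 []).length) glen blen grows brows (fun y hy x hx => ?_)
    rw [gget y hy x hx, bcell y hy x hx]
    by_cases hin : 1 ≤ x ∧ x < (h.getD 0 []).length - 1 ∧ 1 ≤ y ∧ y < h.length - 1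
    · rw [if_pos hin, if_pos (pvInterior_true _ _ _ _ (by omega))]
      rfl
    · rw [if_neg hin, if_neg (by rw [pvInterior_false _ _ _ _ (by omega)]; simp)]
  · have hA : botA h = initG h := by
      unfold botA
      by_cases hN3 : 3 ≤ (h.getD 0 []).length
      · simp only [show PySem.List.pyRange ((h.length : Int) - 2) 0 (-1) = ([] : List Int)
            from PySem.List.pyRange_neg_one_eq_nil (by omega), List.foldl_nil]
        exact foldl_id _ _
      · rw [show PySem.List.pyRange 1 (((h.getD 0 []).length : Int) - 1) 1 = ([] : List Int)
            from PySem.List.pyRange_one_eq_nil (by omega), List.foldl_nil]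
    rw [hA]
    exact deg_eq h _ hMN

-- ===== VERDICT (by name: the statement is the Claim_ definition above) =====
theorem buildVisibilityMapsFromOutside_spec : Claim_equal_buildVisibilityMapsFromOutside := by
  intro h _hdom pre
  unfold Spec_buildVisibilityMapsFromOutside
  show (leftA h, topA h, rightA h, botA h) = (leftB h, topB h, rightB h, botB h)
  rw [left_eq h pre, top_eq h pre, right_eq h pre, bot_eq h pre]
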